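-- pv_equiv track=rewrite | github.com/koiralas/CFG-homeworks | homework4/matrix.py | matrix_finder
-- ===== SOURCE A (Python) =====
-- def matrix_finder(matrix, target):
--     x = -1
--     y = -1
--     for index_x in range(len(matrix)):
--         for index_y in range(len(matrix[index_x])):
--             if matrix[index_x][index_y] == target:
--                 x = index_x
--                 y = index_y
--
--     return [x, y]
-- ===== SOURCE B (Python) =====
-- def matrix_finder(matrix, target):
--     for index_x in range(len(matrix) - 1, -1, -1):
--         row = matrix[index_x]
--         for index_y in range(len(row) - 1, -1, -1):
--             if row[index_y] == target:
--                 return [index_x, index_y]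
--     return [-1, -1]
-- ===== Notes on version B (the rewrite author's own statement) =====
-- stated objective: alternative
-- what changed: Replaces A's full forward sweep that overwrites (x,y) on every match with a reverse row-major scan that returns the first match found (the last match in forward order) immediately, short-circuiting instead of visiting every cell.
import Mathlib
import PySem

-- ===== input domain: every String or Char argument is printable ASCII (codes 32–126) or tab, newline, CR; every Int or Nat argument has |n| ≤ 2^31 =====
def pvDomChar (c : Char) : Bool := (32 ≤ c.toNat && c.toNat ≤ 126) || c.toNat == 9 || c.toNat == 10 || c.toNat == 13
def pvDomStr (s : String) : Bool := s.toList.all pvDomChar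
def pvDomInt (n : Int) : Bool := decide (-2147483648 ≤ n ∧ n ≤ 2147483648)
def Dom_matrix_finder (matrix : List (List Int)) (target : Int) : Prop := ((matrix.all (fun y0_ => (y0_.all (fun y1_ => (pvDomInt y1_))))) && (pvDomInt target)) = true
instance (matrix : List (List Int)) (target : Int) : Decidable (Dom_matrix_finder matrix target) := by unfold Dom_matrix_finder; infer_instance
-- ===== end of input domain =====

-- B replaces A's full forward overwrite-sweep with a reverse row-major scan that returns on the
-- first (i.e. row-major-last) match; objective: alternative decomposition with early exit.

-- ===== PORT A =====
-- inner for loop over one row: overwrite (x, y) with (ix, iy) on every match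
def pvARow (row : List Int) (target : Int) (ix : Int) (iy : Nat) (st : Int × Int) : Int × Int :=
  match row with
  | [] => st
  | a :: rest => pvARow rest target ix (iy + 1) (if a == target then (ix, (iy : Int)) else st)

-- outer for loop over the rows
def pvARows (m : List (List Int)) (target : Int) (ix : Nat) (st : Int × Int) : Int × Int :=
  match m with
  | [] => st
  | r :: rest => pvARows rest target (ix + 1) (pvARow r target (ix : Int) 0 st)

def matrix_finder (matrix : List (List Int)) (target : Int) : List Int :=
  let st := pvARows matrix target 0 (-1, -1)
  [st.1, st.2]

-- ===== PORT B =====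
-- scan one row from the END: index (from the row's start) of the last cell equal to target
def pvBRow (row : List Int) (target : Int) : Option Nat :=
  match row with
  | [] => none
  | a :: rest =>
    match pvBRow rest target with
    | some j => some (j + 1)
    | none => if a == target then some 0 else none

-- scan the rows from the END, early exit on the first row (from the end) containing target
def pvBRows (m : List (List Int)) (target : Int) : Option (Nat × Nat) :=
  match m with
  | [] => none
  | r :: rest =>
    match pvBRows rest target with
    | some p => some (p.1 + 1, p.2)
    | none =>
      match pvBRow r target with
      | some j => some (0, j)
      | none => none

def matrix_finder_alt (matrix : List (List Int)) (target : Int) : List Int :=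
  match pvBRows matrix target with
  | some p => [(p.1 : Int), (p.2 : Int)]
  | none => [-1, -1]

-- ===== PRECONDITION & SPEC =====
def Spec_matrix_finder (matrix : List (List Int)) (target : Int) (out : List Int) : Prop := out = matrix_finder_alt matrix target
instance (matrix : List (List Int)) (target : Int) (out : List Int) : Decidable (Spec_matrix_finder matrix target out) := by unfold Spec_matrix_finder; infer_instance

-- ===== CLAIM (what is proved, stated in full; the proofs are below) =====
def Claim_equal_matrix_finder : Prop := ∀ (matrix : List (List Int)) (target : Int), Dom_matrix_finder matrix target → Spec_matrix_finder matrix target (matrix_finder matrix target)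

-- ===== LEMMAS AND PROOFS =====

theorem pvARow_char (row : List Int) (target : Int) (ix : Int) (iy : Nat) (st : Int × Int) :
    pvARow row target ix iy st =
      match pvBRow row target with
      | some j => (ix, ((iy + j : Nat) : Int))
      | none => st := by
  induction row generalizing iy st with
  | nil => rfl
  | cons a rest ih =>
    simp only [pvARow, pvBRow, ih]
    cases h : pvBRow rest target with
    | some j =>
      simp only []
      congr 1
      push_cast
      ring
    | none =>
      by_cases ha : a == target <;> simp [ha]

theorem pvARows_char (m : List (List Int)) (target : Int) (ix : Nat) (st : Int × Int) :
    pvARows m target ix st =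
      match pvBRows m target with
      | some p => (((ix + p.1 : Nat) : Int), (p.2 : Int))
      | none => st := by
  induction m generalizing ix st with
  | nil => rfl
  | cons r rest ih =>
    simp only [pvARows, pvBRows, ih, pvARow_char]
    cases h : pvBRows rest target with
    | some p =>
      simp only []
      congr 1
      push_cast
      ring
    | none =>
      cases hr : pvBRow r target with
      | some j => simp
      | none => simp

-- ===== VERDICT (by name: the statement is the Claim_ definition above) =====
theorem matrix_finder_spec : Claim_equal_matrix_finder := by
  intro matrix target _
  unfold Spec_matrix_finder matrix_finder matrix_finder_alt
  rw [pvARows_char]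
  cases h : pvBRows matrix target with
  | some p => simp
  | none => rfl
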